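-- pv_equiv track=rewrite | github.com/DerekStevens99/CCDS-twitter-analysis | Twitter_python.py | wordimportance
-- ===== SOURCE A (Python) =====
-- stops = ['are', 'be', ' ','as', 'and', 'of', 'a', 'to', 'the', 'at', 'is', 'in','was', 'The', 'the', '', 'for', 'on','our', 'all']
--
-- def wordimportance(data):
--     totals = {}
--     for tweet in data:
--         for word in tweet[0]:
--             if word in stops:
--                 continue
--             elif word not in totals:
--                 totals[word] = [tweet[1],1]
--             else:
--                 totals[word][0]+=tweet[1]
--                 totals[word][1]+=1
--     sortedtotals = sorted(totals.items(), key = lambda t:t[1][0])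
--     return sortedtotals
-- ===== SOURCE B (Python) =====
-- stops = ['are', 'be', ' ','as', 'and', 'of', 'a', 'to', 'the', 'at', 'is', 'in','was', 'The', 'the', '', 'for', 'on','our', 'all']
--
-- def wordimportance(data):
--     # pass 1: flatten to (word, sentiment) pairs, dropping stopwords
--     pairs = [(word, tweet[1]) for tweet in data for word in tweet[0] if word not in stops]
--     # pass 2: group sentiment values per word (insertion order = first occurrence)
--     groups = {}
--     for word, value in pairs:
--         groups.setdefault(word, []).append(value)
--     # pass 3: reduce each value-list to [sum, count], then stable sort by sum
--     items = [(word, [sum(vals), len(vals)]) for word, vals in groups.items()]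
--     items.sort(key=lambda t: t[1][0])
--     return items
-- ===== Notes on version B (the rewrite author's own statement) =====
-- stated objective: alternative
-- what changed: A keeps a running [sum,count] pair updated in-place inside one nested loop; B decomposes into three passes: flatten tweets into filtered (word, sentiment) pairs, group the values per word with setdefault, then reduce each group to [sum, len] and stable-sort by sum.
import Mathlib
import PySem

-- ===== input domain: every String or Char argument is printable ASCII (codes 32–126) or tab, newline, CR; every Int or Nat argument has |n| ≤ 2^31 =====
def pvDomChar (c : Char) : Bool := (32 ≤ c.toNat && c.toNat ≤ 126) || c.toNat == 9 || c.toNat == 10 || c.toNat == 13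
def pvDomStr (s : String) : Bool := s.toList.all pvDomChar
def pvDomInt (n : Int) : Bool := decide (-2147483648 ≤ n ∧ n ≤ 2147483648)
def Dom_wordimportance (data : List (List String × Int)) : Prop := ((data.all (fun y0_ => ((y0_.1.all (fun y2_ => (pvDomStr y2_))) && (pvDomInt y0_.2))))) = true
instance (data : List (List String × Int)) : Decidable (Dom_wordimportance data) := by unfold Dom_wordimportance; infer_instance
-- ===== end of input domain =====

-- B replaces A's interleaved sum/count dict updates by three separate passes (flatten-filter, group values per word, reduce to [sum,count] then sort); same result, alternative decomposition.

def pvStops : List String := ["are", "be", " ", "as", "and", "of", "a", "to", "the", "at", "is", "in", "was", "The", "the", "", "for", "on", "our", "all"]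

-- ===== PORT A =====
def wordimportance (data : List (List String × Int)) : List (String × List Int) :=
  let totals : PySem.Dict String (List Int) :=
    data.foldl (fun totals tweet =>
      tweet.1.foldl (fun totals word =>
        if pvStops.contains word then totals
        else if totals.contains word = false then
          totals.insert word [tweet.2, 1]
        else
          -- totals[word][0] += tweet[1]; totals[word][1] += 1 (in-place list update)
          let l := totals.getD word []
          totals.insert word [l.getD 0 0 + tweet.2, l.getD 1 0 + 1]) totals)
      PySem.Dict.empty
  PySem.List.sorted totals.items (fun t => t.2.getD 0 0) false

-- ===== PORT B =====
def wordimportance_alt (data : List (List String × Int)) : List (String × List Int) :=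
  let pairs : List (String × Int) :=
    data.flatMap (fun tweet =>
      (tweet.1.filter (fun w => !pvStops.contains w)).map (fun w => (w, tweet.2)))
  let groups : PySem.Dict String (List Int) :=
    pairs.foldl (fun d p => d.insert p.1 (d.getD p.1 [] ++ [p.2])) PySem.Dict.empty
  let items := groups.items.map (fun p => (p.1, [p.2.sum, (p.2.length : Int)]))
  PySem.List.sorted items (fun t => t.2.getD 0 0) false

-- ===== PRECONDITION & SPEC =====
def Spec_wordimportance (data : List (List String × Int)) (out : List (String × List Int)) : Prop := out = wordimportance_alt data
instance (data : List (List String × Int)) (out : List (String × List Int)) : Decidable (Spec_wordimportance data out) := by unfold Spec_wordimportance; infer_instance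

-- ===== CLAIM (what is proved, stated in full; the proofs are below) =====
def Claim_equal_wordimportance : Prop := ∀ (data : List (List String × Int)), Dom_wordimportance data → Spec_wordimportance data (wordimportance data)

-- ===== LEMMAS AND PROOFS =====

-- reduce one word's value-list to (word, [sum, count])
def pvRed (p : String × List Int) : String × List Int := (p.1, [p.2.sum, (p.2.length : Int)])

-- the image of a dict of value-lists under pvRed
def pvMapD (d : PySem.Dict String (List Int)) : PySem.Dict String (List Int) :=
  PySem.Dict.mk (d.items.map pvRed)

-- A's combined per-pair step (after flattening/filtering)
def pvStepA (d : PySem.Dict String (List Int)) (p : String × Int) : PySem.Dict String (List Int) :=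
  if d.contains p.1 = false then d.insert p.1 [p.2, 1]
  else
    let l := d.getD p.1 []
    d.insert p.1 [l.getD 0 0 + p.2, l.getD 1 0 + 1]

def pvStepB (d : PySem.Dict String (List Int)) (p : String × Int) : PySem.Dict String (List Int) :=
  d.insert p.1 (d.getD p.1 [] ++ [p.2])

lemma pvMapD_keys (d : PySem.Dict String (List Int)) : (pvMapD d).keys = d.keys := by
  simp [pvMapD, PySem.Dict.keys, pvRed, Function.comp]

lemma pvMapD_contains (d : PySem.Dict String (List Int)) (w : String) :
    (pvMapD d).contains w = d.contains w := by
  rw [PySem.Dict.contains_eq_decide_mem_keys, PySem.Dict.contains_eq_decide_mem_keys, pvMapD_keys]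

lemma pvStep_comm (d : PySem.Dict String (List Int)) (h : d.keys.Nodup) (p : String × Int) :
    pvStepA (pvMapD d) p = pvMapD (pvStepB d p) := by
  obtain ⟨w, v⟩ := p
  by_cases hc : d.contains w = false
  · have hcm : (pvMapD d).contains w = false := by rw [pvMapD_contains]; exact hc
    have hgd : d.getD w [] = [] := PySem.Dict.getD_of_not_contains d [] hc
    apply PySem.Dict.ext
    rw [show pvStepA (pvMapD d) (w, v) = (pvMapD d).insert w [v, 1] from by
      simp [pvStepA, hcm]]
    rw [PySem.Dict.items_insert_of_not_contains _ _ hcm]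
    simp only [pvStepB, hgd, List.nil_append, pvMapD,
      PySem.Dict.items_insert_of_not_contains d _ hc, List.map_append]
    simp [pvRed]
  · have hc' : d.contains w = true := by simpa using hc
    -- the stored list of w in d
    obtain ⟨vs, hvs⟩ : ∃ vs, d.get? w = some vs := by
      have h1 : (d.get? w).isSome = true := by
        rw [← PySem.Dict.contains_eq_isSome_get? d w]; exact hc'
      exact Option.isSome_iff_exists.mp h1
    have hmem : (w, vs) ∈ d.items := PySem.Dict.mem_items_of_get?_eq_some d hvs
    have hgd : d.getD w [] = vs := PySem.Dict.getD_of_get?_eq_some d [] hvs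
    have hmem' : (w, [vs.sum, (vs.length : Int)]) ∈ (pvMapD d).items := by
      simp only [pvMapD]
      exact List.mem_map.mpr ⟨(w, vs), hmem, rfl⟩
    have hnodup' : (pvMapD d).keys.Nodup := by rw [pvMapD_keys]; exact h
    have hgd' : (pvMapD d).getD w [] = [vs.sum, (vs.length : Int)] :=
      PySem.Dict.getD_of_mem_items (pvMapD d) hmem' hnodup' []
    have hcm : (pvMapD d).contains w = true := by rw [pvMapD_contains]; exact hc'
    apply PySem.Dict.ext
    rw [show pvStepA (pvMapD d) (w, v)
        = (pvMapD d).insert w [((pvMapD d).getD w []).getD 0 0 + v, ((pvMapD d).getD w []).getD 1 0 + 1] from by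
      simp [pvStepA, hcm]]
    rw [PySem.Dict.items_insert_of_contains _ _ hcm, hgd']
    simp only [pvStepB, hgd, pvMapD, PySem.Dict.items_insert_of_contains d _ hc', List.map_map]
    apply List.map_congr_left
    intro q _
    by_cases hq : q.1 == w <;>
      simp [pvRed, hq, Function.comp]

lemma pvFold_comm (pairs : List (String × Int)) (d : PySem.Dict String (List Int))
    (h : d.keys.Nodup) :
    pairs.foldl pvStepA (pvMapD d) = pvMapD (pairs.foldl pvStepB d) := by
  induction pairs generalizing d with
  | nil => rfl
  | cons p t ih =>
    simp only [List.foldl_cons, pvStep_comm d h p]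
    exact ih _ (by
      have := PySem.Dict.nodup_keys_foldl_insert_key [p] (fun q => q.1)
        (fun d q => d.getD q.1 [] ++ [q.2]) d h
      simpa [pvStepB] using this)

-- A's nested loop over tweets/words equals the fold of pvStepA over the flattened pairs
lemma pvA_flat (data : List (List String × Int)) (d : PySem.Dict String (List Int)) :
    data.foldl (fun totals tweet =>
      tweet.1.foldl (fun totals word =>
        if pvStops.contains word then totals
        else if totals.contains word = false then
          totals.insert word [tweet.2, 1]
        else
          let l := totals.getD word []
          totals.insert word [l.getD 0 0 + tweet.2, l.getD 1 0 + 1]) totals) d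
    = (data.flatMap (fun tweet =>
        (tweet.1.filter (fun w => !pvStops.contains w)).map (fun w => (w, tweet.2)))).foldl
        pvStepA d := by
  induction data generalizing d with
  | nil => rfl
  | cons t rest ih =>
    simp only [List.foldl_cons, List.flatMap_cons, List.foldl_append, ih]
    congr 1
    rw [List.foldl_map]
    rw [show (t.1.foldl (fun totals word =>
        if pvStops.contains word then totals
        else if totals.contains word = false then totals.insert word [t.2, 1]
        else
          let l := totals.getD word []
          totals.insert word [l.getD 0 0 + t.2, l.getD 1 0 + 1]) d)
      = t.1.foldl (fun totals word =>
          if !pvStops.contains word then pvStepA totals (word, t.2) else totals) d from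
      PySem.List.foldl_congr_mem _ _ _ _ (by
        intro acc x _
        by_cases hx : x ∈ pvStops
        · simp [hx]
        · simp [hx, pvStepA])]  -- flip the stop-word test to the 'if keep' shape
    rw [PySem.List.foldl_if_eq_foldl_filter]

-- ===== VERDICT (by name: the statement is the Claim_ definition above) =====
theorem wordimportance_spec : Claim_equal_wordimportance := by
  intro data _
  unfold Spec_wordimportance wordimportance wordimportance_alt
  have hempty : pvMapD PySem.Dict.empty = PySem.Dict.empty := rfl
  rw [pvA_flat, ← hempty, pvFold_comm _ _ PySem.Dict.nodup_keys_empty]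
  rfl
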